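-- pv_equiv track=rewrite | github.com/camicaicedof/Tarea1MariaCamila | tarea1.py | sumarValoresMatriz
-- ===== SOURCE A (Python) =====
-- def sumarValoresMatriz (matDisp, listaTup):
--     suma=0
--     for i in range (0,len(listaTup)):
--         if listaTup[i][0] in matDisp:
--             for j in range (0,len(matDisp[listaTup[i][0]])):
--                 if listaTup[i][1] == matDisp[listaTup[i][0]][j][0]:
--                     suma += matDisp[listaTup[i][0]][j][1]
--     return suma
-- ===== SOURCE B (Python) =====
-- def sumarValoresMatriz(matDisp, listaTup):
--     count = {}
--     for t in listaTup:
--         count[t] = count.get(t, 0) + 1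
--     total = 0
--     for key, entries in matDisp.items():
--         for sub, val in entries:
--             total += val * count.get((key, sub), 0)
--     return total
-- ===== Notes on version B (the rewrite author's own statement) =====
-- stated objective: alternative
-- what changed: Instead of rescanning the looked-up matrix row for every query tuple, B builds a multiplicity dict of the query tuples once and then makes a single pass over the matrix, adding value*multiplicity per entry.
import Mathlib
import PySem

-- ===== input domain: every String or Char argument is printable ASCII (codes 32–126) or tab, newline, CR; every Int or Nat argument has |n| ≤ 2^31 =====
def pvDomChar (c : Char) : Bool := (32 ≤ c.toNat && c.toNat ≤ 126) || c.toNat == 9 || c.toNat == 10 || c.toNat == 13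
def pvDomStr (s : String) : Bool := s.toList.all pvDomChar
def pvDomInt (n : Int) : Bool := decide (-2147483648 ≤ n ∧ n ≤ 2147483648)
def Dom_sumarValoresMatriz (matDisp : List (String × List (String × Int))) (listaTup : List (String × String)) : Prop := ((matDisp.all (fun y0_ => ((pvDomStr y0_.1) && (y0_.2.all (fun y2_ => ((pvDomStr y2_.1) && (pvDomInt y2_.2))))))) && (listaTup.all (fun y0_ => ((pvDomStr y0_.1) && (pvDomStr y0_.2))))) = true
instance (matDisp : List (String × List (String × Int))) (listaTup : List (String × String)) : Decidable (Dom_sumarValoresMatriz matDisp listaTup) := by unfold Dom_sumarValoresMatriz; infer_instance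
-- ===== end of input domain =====

-- B replaces A's per-query rescans of the looked-up matrix row by one multiplicity dict of
-- the query tuples plus a single pass over the matrix (objective: alternative decomposition).

-- ===== PORT A =====
-- literal transliteration of A: index loop over listaTup, dict membership + lookup,
-- inner index loop over the matching row.
def sumarValoresMatriz (matDisp : List (String × List (String × Int))) (listaTup : List (String × String)) : Int :=
  (PySem.List.pyRange 0 (listaTup.length : Int) 1).foldl
    (fun suma i =>
      let t := PySem.List.pyGetD listaTup i ("", "")
      if (PySem.Dict.mk matDisp).contains t.1 then
        let row := (PySem.Dict.mk matDisp).getD t.1 []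
        (PySem.List.pyRange 0 (row.length : Int) 1).foldl
          (fun suma j =>
            let e := PySem.List.pyGetD row j ("", 0)
            if t.2 == e.1 then suma + e.2 else suma)
          suma
      else suma)
    0

-- ===== PORT B =====
-- transliteration of Source B: build the query-tuple counter, then one pass over the matrix.
def sumarValoresMatriz_alt (matDisp : List (String × List (String × Int))) (listaTup : List (String × String)) : Int :=
  let count : PySem.Dict (String × String) Int :=
    listaTup.foldl (fun d t => d.insert t (d.getD t 0 + 1)) PySem.Dict.empty
  matDisp.foldl
    (fun total kv =>
      kv.2.foldl (fun total e => total + e.2 * count.getD (kv.1, e.1) 0) total)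
    0

-- ===== PRECONDITION & SPEC =====
-- Pre_ requires the keys of matDisp to be pairwise distinct: that is the invariant of the
-- Python dict matDisp (an association list with duplicate keys encodes no Python input);
-- on duplicate-key lists A reads only the first binding of a key while B reads them all.
def Pre_sumarValoresMatriz (matDisp : List (String × List (String × Int))) (listaTup : List (String × String)) : Prop :=
  (matDisp.map Prod.fst).Nodup
instance (matDisp : List (String × List (String × Int))) (listaTup : List (String × String)) : Decidable (Pre_sumarValoresMatriz matDisp listaTup) := by unfold Pre_sumarValoresMatriz; infer_instance

def pvWitness_sumarValoresMatriz : (List (String × List (String × Int))) × (List (String × String)) :=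
  ([("a", [("x", 2), ("y", 3)]), ("b", [("x", 5)])], [("a", "x"), ("a", "x"), ("b", "z")])

def Spec_sumarValoresMatriz (matDisp : List (String × List (String × Int))) (listaTup : List (String × String)) (out : Int) : Prop := out = sumarValoresMatriz_alt matDisp listaTup
instance (matDisp : List (String × List (String × Int))) (listaTup : List (String × String)) (out : Int) : Decidable (Spec_sumarValoresMatriz matDisp listaTup out) := by unfold Spec_sumarValoresMatriz; infer_instance

-- ===== CLAIM (what is proved, stated in full; the proofs are below) =====
def Claim_equal_sumarValoresMatriz : Prop := ∀ (matDisp : List (String × List (String × Int))) (listaTup : List (String × String)), Dom_sumarValoresMatriz matDisp listaTup → Pre_sumarValoresMatriz matDisp listaTup → Spec_sumarValoresMatriz matDisp listaTup (sumarValoresMatriz matDisp listaTup)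

-- ===== LEMMAS AND PROOFS =====

-- A's loop body over one query (let-free; definitionally equal to the port's body)
def pvInner (t : String × String) (suma : Int) (e : String × Int) : Int :=
  if t.2 == e.1 then suma + e.2 else suma

def pvOuter (matDisp : List (String × List (String × Int))) (suma : Int) (t : String × String) : Int :=
  if (PySem.Dict.mk matDisp).contains t.1 then
    (PySem.List.pyRange 0 ((((PySem.Dict.mk matDisp).getD t.1 []).length : Nat) : Int) 1).foldl
      (fun suma j => pvInner t suma (PySem.List.pyGetD ((PySem.Dict.mk matDisp).getD t.1 []) j ("", 0)))
      suma
  else suma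

-- contribution of one query t to A's sum
def pvG (matDisp : List (String × List (String × Int))) (t : String × String) : Int :=
  if (PySem.Dict.mk matDisp).contains t.1 then
    (((PySem.Dict.mk matDisp).getD t.1 []).map (fun e => if t.2 == e.1 then e.2 else 0)).sum
  else 0

-- contribution of one query t across all matrix entries (B's view)
def pvF (matDisp : List (String × List (String × Int))) (t : String × String) : Int :=
  (matDisp.map (fun kv => (kv.2.map (fun e => if (kv.1, e.1) = t then e.2 else 0)).sum)).sum

theorem pvF_cons (kv : String × List (String × Int)) (rest : List (String × List (String × Int)))
    (t : String × String) :
    pvF (kv :: rest) t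
      = (kv.2.map (fun e => if (kv.1, e.1) = t then e.2 else 0)).sum + pvF rest t := by
  unfold pvF
  simp

-- a conditional-accumulate foldl is init + the sum of the guarded values
theorem pv_foldl_ite_add {α : Type} (p : α → Bool) (f : α → Int) :
    ∀ (l : List α) (init : Int),
      l.foldl (fun s e => if p e then s + f e else s) init
        = init + (l.map (fun e => if p e then f e else 0)).sum := by
  intro l
  induction l with
  | nil => simp
  | cons x xs ih =>
      intro init
      by_cases h : p x
      · simp only [List.foldl_cons, List.map_cons, List.sum_cons, h, if_true, ih]
        ring
      · simp only [List.foldl_cons, List.map_cons, List.sum_cons, h, if_false,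
          Bool.false_eq_true, ih]
        ring

-- a foldl whose step adds g pointwise is init + the sum of g
theorem pv_foldl_of_step {α : Type} (step : Int → α → Int) (g : α → Int)
    (h : ∀ (a : α) (init : Int), step init a = init + g a) :
    ∀ (l : List α) (init : Int), l.foldl step init = init + (l.map g).sum := by
  intro l
  induction l with
  | nil => intro init; simp
  | cons x xs ih =>
      intro init
      rw [List.foldl_cons, h, ih]
      simp only [List.map_cons, List.sum_cons]
      ring

theorem pvOuter_eq (matDisp : List (String × List (String × Int))) (t : String × String)
    (init : Int) : pvOuter matDisp init t = init + pvG matDisp t := by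
  unfold pvOuter pvG
  by_cases h : (PySem.Dict.mk matDisp).contains t.1 = true
  · rw [if_pos h, if_pos h,
      PySem.List.foldl_pyRange_zero_pyGetD' ((PySem.Dict.mk matDisp).getD t.1 []) ("", 0)
        (pvInner t) init]
    exact pv_foldl_ite_add (fun e : String × Int => t.2 == e.1) (fun e : String × Int => e.2) _ init
  · rw [if_neg h, if_neg h]
    ring

theorem pvA_eq_sum_G (matDisp : List (String × List (String × Int)))
    (l : List (String × String)) :
    sumarValoresMatriz matDisp l = (l.map (pvG matDisp)).sum := by
  show (PySem.List.pyRange 0 (l.length : Int) 1).foldl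
      (fun suma i => pvOuter matDisp suma (PySem.List.pyGetD l i ("", ""))) 0
    = (l.map (pvG matDisp)).sum
  rw [PySem.List.foldl_pyRange_zero_pyGetD' l ("", "") (pvOuter matDisp) 0,
    pv_foldl_of_step (pvOuter matDisp) (pvG matDisp) (pvOuter_eq matDisp) l 0, zero_add]

-- B as a double sum of value × multiplicity
theorem pvB_eq_sum (matDisp : List (String × List (String × Int))) (l : List (String × String)) :
    sumarValoresMatriz_alt matDisp l
      = (matDisp.map (fun kv => (kv.2.map (fun e => e.2 * (l.count (kv.1, e.1) : Int))).sum)).sum := by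
  unfold sumarValoresMatriz_alt
  have hcnt : ∀ q : String × String,
      (l.foldl (fun d t => d.insert t (d.getD t 0 + 1)) PySem.Dict.empty).getD q 0
        = (l.count q : Int) := by
    intro q
    rw [PySem.Dict.getD_foldl_insert_add_one]
    simp
  simp only [hcnt]
  have hrow : ∀ (kv : String × List (String × Int)) (init : Int),
      kv.2.foldl (fun total e => total + e.2 * (l.count (kv.1, e.1) : Int)) init
        = init + (kv.2.map (fun e => e.2 * (l.count (kv.1, e.1) : Int))).sum := by
    intro kv init
    rw [PySem.List.foldl_add]
  rw [pv_foldl_of_step _ _ hrow matDisp 0, zero_add]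

-- if t's key does not occur in matDisp, its cross-matrix contribution is 0
theorem pvF_zero (t : String × String) :
    ∀ (matDisp : List (String × List (String × Int))),
      t.1 ∉ matDisp.map Prod.fst → pvF matDisp t = 0 := by
  intro matDisp
  induction matDisp with
  | nil => intro _; rfl
  | cons kv rest ih =>
      intro h
      simp only [List.map_cons, List.mem_cons, not_or] at h
      rw [pvF_cons]
      have h1 : ∀ e ∈ kv.2, (if (kv.1, e.1) = t then e.2 else 0) = (fun _ => (0 : Int)) e := by
        intro e _
        exact if_neg (fun hc => h.1 ((congrArg Prod.fst hc).symm))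
      rw [List.map_congr_left h1, ih h.2]
      simp

-- with distinct keys, B's per-query contribution equals A's
theorem pvF_eq_pvG (t : String × String) :
    ∀ (matDisp : List (String × List (String × Int))),
      (matDisp.map Prod.fst).Nodup → pvF matDisp t = pvG matDisp t := by
  intro matDisp
  induction matDisp with
  | nil => intro _; rfl
  | cons kv rest ih =>
      intro hnd
      simp only [List.map_cons, List.nodup_cons] at hnd
      by_cases hk : kv.1 = t.1
      · rw [pvF_cons, pvF_zero t rest (hk ▸ hnd.1), add_zero]
        have hcont : (PySem.Dict.mk (kv :: rest)).contains t.1 = true := by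
          simp [PySem.Dict.contains_mk, hk]
        have hget : (PySem.Dict.mk (kv :: rest)).getD t.1 [] = kv.2 := by
          rw [PySem.Dict.getD_eq_get?_getD, PySem.Dict.get?_mk_cons]
          simp [hk]
        unfold pvG
        rw [if_pos hcont, hget]
        apply congrArg List.sum
        apply List.map_congr_left
        intro e _
        by_cases he : e.1 = t.2
        · have h1 : (kv.1, e.1) = t := by rw [hk, he]
          have h2 : (t.2 == e.1) = true := by simp [he]
          rw [if_pos h1, if_pos h2]
        · have h1 : (kv.1, e.1) ≠ t := fun hc => he (congrArg Prod.snd hc)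
          have h2 : (t.2 == e.1) = false := by
            rw [beq_eq_false_iff_ne]
            exact fun hc => he hc.symm
          rw [if_neg h1, h2]
          simp
      · have hb : (kv.1 == t.1) = false := beq_eq_false_iff_ne.mpr hk
        have hcont : (PySem.Dict.mk (kv :: rest)).contains t.1
            = (PySem.Dict.mk rest).contains t.1 := by
          simp [PySem.Dict.contains_mk, List.any_cons, hb]
        have hget : (PySem.Dict.mk (kv :: rest)).getD t.1 []
            = (PySem.Dict.mk rest).getD t.1 [] := by
          rw [PySem.Dict.getD_eq_get?_getD, PySem.Dict.get?_mk_cons, hb]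
          simp only [Bool.false_eq_true, if_false]
          rw [← PySem.Dict.getD_eq_get?_getD]
        have hhead : ∀ e ∈ kv.2, (if (kv.1, e.1) = t then e.2 else 0) = (fun _ => (0 : Int)) e :=
          fun e _ => if_neg (fun hc => hk (congrArg Prod.fst hc))
        rw [pvF_cons, List.map_congr_left hhead]
        simp only [List.map_const', List.sum_replicate, smul_zero, zero_add]
        rw [ih hnd.2]
        unfold pvG
        rw [hcont, hget]

-- exchange of summation: Σ_entries v·count = Σ_queries pvG
theorem pv_exchange (matDisp : List (String × List (String × Int)))
    (hnd : (matDisp.map Prod.fst).Nodup) :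
    ∀ (l : List (String × String)),
      (matDisp.map (fun kv => (kv.2.map (fun e => e.2 * (l.count (kv.1, e.1) : Int))).sum)).sum
        = (l.map (pvG matDisp)).sum := by
  intro l
  induction l with
  | nil => simp
  | cons t rest ih =>
      simp only [List.map_cons, List.sum_cons]
      have hsplit : ∀ kv : String × List (String × Int),
          (kv.2.map (fun e => e.2 * (((t :: rest).count (kv.1, e.1) : Nat) : Int))).sum
            = (kv.2.map (fun e => e.2 * ((rest.count (kv.1, e.1) : Nat) : Int)
                + if (kv.1, e.1) = t then e.2 else 0)).sum := by
        intro kv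
        apply congrArg List.sum
        apply List.map_congr_left
        intro e _
        rw [List.count_cons]
        by_cases h : (kv.1, e.1) = t
        · rw [if_pos h]
          have : (t == (kv.1, e.1)) = true := by simp [h]
          rw [this]
          push_cast
          simp only [if_true]
          ring
        · rw [if_neg h]
          have : (t == (kv.1, e.1)) = false := by
            rw [beq_eq_false_iff_ne]
            exact fun hc => h hc.symm
          rw [this]
          simp
      calc (matDisp.map (fun kv => (kv.2.map (fun e => e.2 * (((t :: rest).count (kv.1, e.1) : Nat) : Int))).sum)).sum
          = (matDisp.map (fun kv =>
              (kv.2.map (fun e => e.2 * ((rest.count (kv.1, e.1) : Nat) : Int)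
                + if (kv.1, e.1) = t then e.2 else 0)).sum)).sum := by
            exact congrArg List.sum (List.map_congr_left (fun kv _ => hsplit kv))
        _ = (matDisp.map (fun kv => (kv.2.map (fun e => e.2 * ((rest.count (kv.1, e.1) : Nat) : Int))).sum
              + (kv.2.map (fun e => if (kv.1, e.1) = t then e.2 else 0)).sum)).sum := by
            exact congrArg List.sum (List.map_congr_left (fun kv _ =>
              PySem.List.sum_map_add_int kv.2 _ _))
        _ = (matDisp.map (fun kv => (kv.2.map (fun e => e.2 * ((rest.count (kv.1, e.1) : Nat) : Int))).sum)).sum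
              + pvF matDisp t :=
            PySem.List.sum_map_add_int matDisp _ _
        _ = (rest.map (pvG matDisp)).sum + pvG matDisp t := by
            rw [ih, pvF_eq_pvG t matDisp hnd]
        _ = pvG matDisp t + (rest.map (pvG matDisp)).sum := by ring

-- ===== VERDICT (by name: the statement is the Claim_ definition above) =====
theorem sumarValoresMatriz_spec : Claim_equal_sumarValoresMatriz := by
  intro matDisp listaTup _ hpre
  unfold Spec_sumarValoresMatriz
  rw [pvA_eq_sum_G matDisp listaTup, pvB_eq_sum matDisp listaTup,
    pv_exchange matDisp hpre listaTup]
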